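-- pv_equiv track=rewrite | github.com/iamdebi/AOC-25 | Day3/part2.py | annotate_grid
-- ===== SOURCE A (Python) =====
-- from typing import List, Tuple
--
-- def annotate_grid(grid: List[List[str]], removed_coords: List[Tuple[int,int]]) -> List[str]:
--     rows = []
--     removed_set = set(removed_coords)
--     for r in range(len(grid)):
--         chars = []
--         for c in range(len(grid[r])):
--             if (r, c) in removed_set:
--                 chars.append("x")
--             else:
--                 chars.append(grid[r][c])
--         rows.append("".join(chars))
--     return rows
-- ===== SOURCE B (Python) =====
-- from typing import List, Tuple
--
-- def annotate_grid(grid: List[List[str]], removed_coords: List[Tuple[int, int]]) -> List[str]: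
--     out = []
--     for r in range(len(grid)):
--         chars = list(grid[r])
--         for rr, c in removed_coords:
--             if rr == r and 0 <= c < len(chars):
--                 chars[c] = "x"
--         out.append("".join(chars))
--     return out
-- ===== Notes on version B (the rewrite author's own statement) =====
-- stated objective: simpler
-- what changed: Instead of building a set of removed coordinates and membership-testing every cell, B copies each row and directly overwrites the in-bounds removed columns by scanning the removal list per row.
import Mathlib
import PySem

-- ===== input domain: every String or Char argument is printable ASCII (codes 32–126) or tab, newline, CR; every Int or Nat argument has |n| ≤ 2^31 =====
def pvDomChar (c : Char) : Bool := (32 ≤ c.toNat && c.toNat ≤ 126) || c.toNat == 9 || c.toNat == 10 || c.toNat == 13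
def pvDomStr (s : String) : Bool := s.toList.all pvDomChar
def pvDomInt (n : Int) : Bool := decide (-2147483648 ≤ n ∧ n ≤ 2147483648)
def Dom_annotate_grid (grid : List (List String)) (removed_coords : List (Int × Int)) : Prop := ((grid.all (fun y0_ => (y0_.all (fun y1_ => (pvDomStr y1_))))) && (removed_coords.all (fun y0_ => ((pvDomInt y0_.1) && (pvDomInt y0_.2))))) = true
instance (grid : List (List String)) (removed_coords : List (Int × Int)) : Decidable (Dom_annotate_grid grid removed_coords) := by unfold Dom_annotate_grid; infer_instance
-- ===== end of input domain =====

-- B replaces A's per-cell membership test against a set by a per-row scan of the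
-- removal list that overwrites the in-bounds removed columns directly (objective: simpler).

-- ===== PORT A =====
def annotate_grid (grid : List (List String)) (removed_coords : List (Int × Int)) : List String :=
  let removed_set : PySem.Set (Int × Int) := PySem.Set.ofList removed_coords
  (List.range grid.length).foldl (fun (rows : List String) (r : Nat) =>
    let row := grid.getD r []
    let chars := (List.range row.length).foldl (fun (chars : List String) (c : Nat) =>
      if PySem.Set.contains removed_set ((r : Int), (c : Int)) then chars ++ ["x"]
      else chars ++ [row.getD c ""]) ([] : List String)
    rows ++ [String.join chars]) []

-- ===== PORT B =====
def annotate_grid_alt (grid : List (List String)) (removed_coords : List (Int × Int)) : List String :=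
  (List.range grid.length).foldl (fun (out : List String) (r : Nat) =>
    let chars := removed_coords.foldl (fun (ch : List String) (p : Int × Int) =>
      if p.1 = (r : Int) ∧ 0 ≤ p.2 ∧ p.2 < (ch.length : Int) then ch.set p.2.toNat "x" else ch)
      (grid.getD r [])
    out ++ [String.join chars]) []

-- ===== PRECONDITION & SPEC =====
def Spec_annotate_grid (grid : List (List String)) (removed_coords : List (Int × Int)) (out : List String) : Prop := out = annotate_grid_alt grid removed_coords
instance (grid : List (List String)) (removed_coords : List (Int × Int)) (out : List String) : Decidable (Spec_annotate_grid grid removed_coords out) := by unfold Spec_annotate_grid; infer_instance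

-- ===== CLAIM (what is proved, stated in full; the proofs are below) =====
def Claim_equal_annotate_grid : Prop := ∀ (grid : List (List String)) (removed_coords : List (Int × Int)), Dom_annotate_grid grid removed_coords → Spec_annotate_grid grid removed_coords (annotate_grid grid removed_coords)

-- ===== LEMMAS AND PROOFS =====

theorem pv_foldl_append {α β : Type} (f : α → β) :
    ∀ (l : List α) (acc : List β), l.foldl (fun a x => a ++ [f x]) acc = acc ++ l.map f := by
  intro l
  induction l with
  | nil => simp
  | cons x xs ih => intro acc; simp [List.foldl_cons, ih]

-- A's inner loop over the columns, in map form
theorem pv_a_row (removed : List (Int × Int)) (r : Nat) (row : List String) :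
    (List.range row.length).foldl (fun (chars : List String) (c : Nat) =>
        if PySem.Set.contains (PySem.Set.ofList removed) ((r : Int), (c : Int)) then chars ++ ["x"]
        else chars ++ [row.getD c ""]) ([] : List String)
      = (List.range row.length).map
          (fun (c : Nat) => if ((r : Int), (c : Int)) ∈ removed then "x" else row.getD c "") := by
  have hfun : (fun (chars : List String) (c : Nat) =>
      if PySem.Set.contains (PySem.Set.ofList removed) ((r : Int), (c : Int)) then chars ++ ["x"]
      else chars ++ [row.getD c ""])
      = (fun (chars : List String) (c : Nat) => chars ++ [if ((r : Int), (c : Int)) ∈ removed then "x" else row.getD c ""]) := by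
    funext chars c
    by_cases h : ((r : Int), (c : Int)) ∈ removed <;>
      simp [h, PySem.Set.mem_ofList]
  rw [hfun, pv_foldl_append]
  simp

-- B's inner loop: length is preserved
theorem pv_b_len (r : Nat) :
    ∀ (cs : List (Int × Int)) (row : List String),
      (cs.foldl (fun (ch : List String) (p : Int × Int) =>
        if p.1 = (r : Int) ∧ 0 ≤ p.2 ∧ p.2 < (ch.length : Int) then ch.set p.2.toNat "x" else ch)
        row).length = row.length := by
  intro cs
  induction cs with
  | nil => intro row; rfl
  | cons p cs ih =>
    intro row
    rw [List.foldl_cons, ih]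
    split <;> simp

-- B's inner loop, pointwise
theorem pv_b_getD (r : Nat) :
    ∀ (cs : List (Int × Int)) (row : List String) (i : Nat), i < row.length →
      (cs.foldl (fun (ch : List String) (p : Int × Int) =>
        if p.1 = (r : Int) ∧ 0 ≤ p.2 ∧ p.2 < (ch.length : Int) then ch.set p.2.toNat "x" else ch)
        row).getD i ""
      = if ((r : Int), (i : Int)) ∈ cs then "x" else row.getD i "" := by
  intro cs
  induction cs with
  | nil => intro row i _; rfl
  | cons p cs ih =>
    intro row i hi
    rw [List.foldl_cons]
    have hl : (if p.1 = (r : Int) ∧ 0 ≤ p.2 ∧ p.2 < (row.length : Int) then row.set p.2.toNat "x" else row).length = row.length := by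
      split <;> simp
    rw [ih _ i (by rw [hl]; exact hi)]
    by_cases hm : ((r : Int), (i : Int)) ∈ cs
    · simp [hm, List.mem_cons]
    · by_cases hp : p = ((r : Int), (i : Int))
      · subst hp
        have hcond : ((r : Int), (i : Int)).1 = (r : Int) ∧ 0 ≤ ((r : Int), (i : Int)).2 ∧ ((r : Int), (i : Int)).2 < (row.length : Int) := by
          exact ⟨rfl, by show (0:Int) ≤ (i:Int); positivity, by show (i:Int) < (row.length:Int); exact_mod_cast hi⟩
        simp only [hcond, if_true, hm, if_false, List.mem_cons, true_or, if_true]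
        simp [List.getD_eq_getElem?_getD, hi]
      · have hmem : (((r : Int), (i : Int)) ∈ p :: cs) = False := by
          simp only [List.mem_cons, eq_iff_iff, iff_false]
          exact not_or.mpr ⟨fun h => hp h.symm, hm⟩
        simp only [hmem, if_false, hm, if_false]
        split
        · rename_i hc
          obtain ⟨h1, h2, h3⟩ := hc
          have hne : p.2.toNat ≠ i := by
            intro he
            apply hp
            have : p.2 = (i : Int) := by omega
            cases p with
            | mk a b => simp_all
          simp [List.getD_eq_getElem?_getD, List.getElem?_set_ne hne]
        · rfl

-- B's inner loop, in map form
theorem pv_b_row (removed : List (Int × Int)) (r : Nat) (row : List String) :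
    removed.foldl (fun (ch : List String) (p : Int × Int) =>
      if p.1 = (r : Int) ∧ 0 ≤ p.2 ∧ p.2 < (ch.length : Int) then ch.set p.2.toNat "x" else ch) row
    = (List.range row.length).map
        (fun (c : Nat) => if ((r : Int), (c : Int)) ∈ removed then "x" else row.getD c "") := by
  apply List.ext_getElem
  · simp [pv_b_len]
  · intro i h1 h2
    have hi : i < row.length := by simpa [pv_b_len] using h1
    have := pv_b_getD r removed row i hi
    rw [List.getD_eq_getElem _ _ h1] at this
    rw [this]
    simp

-- ===== VERDICT (by name: the statement is the Claim_ definition above) =====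
theorem annotate_grid_spec : Claim_equal_annotate_grid := by
  intro grid removed _
  unfold Spec_annotate_grid
  have hfun : (fun (rows : List String) (r : Nat) =>
      rows ++ [String.join ((List.range (grid.getD r []).length).foldl (fun (chars : List String) (c : Nat) =>
        if PySem.Set.contains (PySem.Set.ofList removed) ((r : Int), (c : Int)) then chars ++ ["x"]
        else chars ++ [(grid.getD r []).getD c ""]) ([] : List String))])
      = (fun (rows : List String) (r : Nat) =>
      rows ++ [String.join (removed.foldl (fun (ch : List String) (p : Int × Int) =>
        if p.1 = (r : Int) ∧ 0 ≤ p.2 ∧ p.2 < (ch.length : Int) then ch.set p.2.toNat "x" else ch)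
        (grid.getD r []))]) := by
    funext rows r
    rw [pv_a_row, pv_b_row]
  exact congrArg (fun F => (List.range grid.length).foldl F ([] : List String)) hfun
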